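-- pv_equiv track=rewrite | github.com/youmean0427/Algorithm | 프로그래머스/2/42587. 프로세스/프로세스.py | solution
-- ===== SOURCE A (Python) =====
-- from collections import deque
--
-- def solution(priorities, location):
--     answer = 0
--     arr = deque()
--     for i in range(len(priorities)):
--          arr.append((priorities[i], i))
--
--     result = []
--     while arr:
--         x = arr.popleft()
--         for i in arr:
--             if i[0] > x[0]:
--                 arr.append((x[0], x[1]))
--                 break
--         else:
--             result.append(x[1])
--
--
--     for i in range(len(result)):
--         if result[i] == location:
--             answer = i + 1
--
--     return answer
-- ===== SOURCE B (Python) =====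
-- def solution(priorities, location):
--     # Jump straight to the first maximal-priority process with slicing,
--     # instead of requeueing items one by one.
--     q = [(p, i) for i, p in enumerate(priorities)]
--     result = []
--     while q:
--         m = max(p for p, _ in q)
--         k = next(j for j, pi in enumerate(q) if pi[0] == m)
--         result.append(q[k][1])
--         q = q[k + 1:] + q[:k]
--     try:
--         return result.index(location) + 1
--     except ValueError:
--         return 0
-- ===== Notes on version B (the rewrite author's own statement) =====
-- stated objective: alternative
-- what changed: B replaces A's one-element-at-a-time requeue (with an inner any-greater scan per popped element) by computing the round's maximum priority once, jumping directly to its first holder and rotating the queue with two slices; the final answer uses list.index instead of A's overwrite-on-last-match scan.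
import Mathlib
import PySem

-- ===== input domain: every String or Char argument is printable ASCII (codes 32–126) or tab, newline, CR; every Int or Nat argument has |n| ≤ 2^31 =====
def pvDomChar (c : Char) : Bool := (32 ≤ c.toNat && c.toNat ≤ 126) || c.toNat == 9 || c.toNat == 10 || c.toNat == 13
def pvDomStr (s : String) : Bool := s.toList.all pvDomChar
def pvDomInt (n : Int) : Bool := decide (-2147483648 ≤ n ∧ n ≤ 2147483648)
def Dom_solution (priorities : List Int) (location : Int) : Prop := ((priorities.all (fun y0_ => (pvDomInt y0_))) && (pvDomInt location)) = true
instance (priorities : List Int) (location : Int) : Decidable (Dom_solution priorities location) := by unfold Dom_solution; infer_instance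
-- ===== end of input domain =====

-- B replaces A's one-by-one requeue loop by jumping straight (via slices) to the
-- first maximal-priority process each round; same return value, similar cost ("alternative").

-- ===== PORT A =====

-- max? of a list of Ints is invariant under permutation (used by the
-- termination argument of A's while loop)
theorem int_max?_perm {l l' : List Int} (h : l.Perm l') : l.max? = l'.max? := by
  have key : ∀ m : Int, l.max? = some m ↔ l'.max? = some m := by
    intro m
    rw [List.max?_eq_some_iff, List.max?_eq_some_iff]
    constructor
    · rintro ⟨hm, hub⟩
      exact ⟨h.mem_iff.mp hm, fun b hb => hub b (h.mem_iff.mpr hb)⟩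
    · rintro ⟨hm, hub⟩
      exact ⟨h.mem_iff.mpr hm, fun b hb => hub b (h.mem_iff.mp hb)⟩
  cases hm : l.max? with
  | none =>
    rw [List.max?_eq_none_iff] at hm
    subst hm
    have : l' = [] := h.nil_eq.symm
    simp [this]
  | some m => exact ((key m).mp hm).symm

-- measure used only for the termination of A's while loop: index of the first
-- element holding the queue's maximal priority
def fmIdx (q : List (Int × Int)) : Nat :=
  q.findIdx (fun a => a.1 == ((q.map Prod.fst).max?.getD 0))

theorem fm_rotate (x : Int × Int) (rest : List (Int × Int))
    (h : rest.any (fun a => decide (a.1 > x.1)) = true) :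
    fmIdx (rest ++ [x]) < fmIdx (x :: rest) := by
  obtain ⟨a, ha, hgt⟩ := List.any_eq_true.mp h
  rw [decide_eq_true_eq] at hgt
  -- the two queues have the same maximal priority m
  have hperm : ((rest ++ [x]).map Prod.fst).Perm ((x :: rest).map Prod.fst) := by
    simp only [List.map_append, List.map_cons, List.map_nil]
    exact List.perm_append_singleton _ _
  obtain ⟨m, hm⟩ : ∃ m, ((x :: rest).map Prod.fst).max? = some m := by
    cases hmm : ((x :: rest).map Prod.fst).max? with
    | none => rw [List.max?_eq_none_iff] at hmm; simp at hmm
    | some m => exact ⟨m, rfl⟩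
  obtain ⟨hmem, hub⟩ := List.max?_eq_some_iff.mp hm
  have hax : m > x.1 := lt_of_lt_of_le hgt
    (hub a.1 (by rw [List.map_cons]; exact List.mem_cons_of_mem _ (List.mem_map.mpr ⟨a, ha, rfl⟩)))
  have hxm : (x.1 == m) = false := by simp; omega
  have hmrest : m ∈ rest.map Prod.fst := by
    rcases (by simpa using hmem : m = x.1 ∨ ∃ b, (m, b) ∈ rest) with h1 | ⟨b, hb⟩
    · omega
    · exact List.mem_map.mpr ⟨(m, b), hb, rfl⟩
  obtain ⟨y, hy, hym⟩ := List.mem_map.mp hmrest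
  have hjlt : rest.findIdx (fun a => a.1 == m) < rest.length :=
    List.findIdx_lt_length.mpr ⟨y, hy, by simp [hym]⟩
  unfold fmIdx
  rw [int_max?_perm hperm, hm]
  simp only [Option.getD_some]
  rw [List.findIdx_cons, hxm, List.findIdx_append, if_pos hjlt]
  simp

-- the while loop of A: pop the front, requeue it if some remaining process has
-- strictly greater priority, otherwise record its original index
def stepA (q : List (Int × Int)) (res : List Int) : List Int :=
  match q with
  | [] => res
  | x :: rest =>
    if rest.any (fun a => decide (a.1 > x.1)) then stepA (rest ++ [x]) res
    else stepA rest (res ++ [x.2])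
termination_by (q.length, fmIdx q)
decreasing_by
  · apply Prod.Lex.right'
    · simp
    · exact fm_rotate x rest (by assumption)
  · apply Prod.Lex.left
    simp

def solution (priorities : List Int) (location : Int) : Int :=
  -- arr = deque of (priorities[i], i)
  let arr := (PySem.List.pyRange 0 (PySem.List.len priorities)).foldl
    (fun a i => a ++ [(PySem.List.pyGetD priorities i 0, i)]) []
  let result := stepA arr []
  -- for i in range(len(result)): if result[i] == location: answer = i + 1
  (PySem.List.pyRange 0 (PySem.List.len result)).foldl
    (fun ans i => if PySem.List.pyGetD result i 0 = location then i + 1 else ans) 0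

-- ===== PORT B =====

-- the while loop of B: find the round's maximal priority, jump to its first
-- holder, emit it, and rotate the queue with two slices
def stepB (q : List (Int × Int)) : List Int :=
  -- 'while q:' — the queue is empty exactly when it has no maximum
  match (q.map Prod.fst).max? with
  | none => []
  | some m =>
    let k := q.findIdx (fun pi => pi.1 == m)
    match hx : q[k]? with
    | none => []          -- unreachable: the maximum is attained at index k
    | some x =>
      x.2 :: stepB (PySem.List.slice q (some ((k : Int) + 1)) none ++
                    PySem.List.slice q none (some (k : Int)))
termination_by q.length
decreasing_by
  have hk : List.findIdx (fun pi => pi.1 == m) q < q.length :=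
    (List.getElem?_eq_some_iff.mp hx).1
  have h1 : ((k : Int) + 1) = ((k + 1 : Nat) : Int) := by push_cast; ring
  rw [h1, PySem.List.slice_from_natCast, PySem.List.slice_to_natCast,
    List.length_append, List.length_drop, List.length_take]
  omega

def solution_alt (priorities : List Int) (location : Int) : Int :=
  let q := (PySem.List.enumerate priorities).map (fun ip => (ip.2, ip.1))
  let result := stepB q
  match PySem.List.index? result location with
  | some k => (k : Int) + 1
  | none => 0

-- ===== PRECONDITION & SPEC =====
def Spec_solution (priorities : List Int) (location : Int) (out : Int) : Prop := out = solution_alt priorities location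
instance (priorities : List Int) (location : Int) (out : Int) : Decidable (Spec_solution priorities location out) := by unfold Spec_solution; infer_instance

-- ===== CLAIM (what is proved, stated in full; the proofs are below) =====
def Claim_equal_solution : Prop := ∀ (priorities : List Int) (location : Int), Dom_solution priorities location → Spec_solution priorities location (solution priorities location)

-- ===== LEMMAS AND PROOFS =====

-- the slice pair in stepB is 'rotate past index k'
theorem stepB_arg (q : List (Int × Int)) (k : Nat) :
    PySem.List.slice q (some ((k : Int) + 1)) none ++ PySem.List.slice q none (some (k : Int))
      = q.drop (k + 1) ++ q.take k := by
  have h1 : ((k : Int) + 1) = ((k + 1 : Nat) : Int) := by push_cast; ring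
  rw [h1, PySem.List.slice_from_natCast, PySem.List.slice_to_natCast]

-- one unfolding of stepB when the maximum m is attained and selected at index k
theorem stepB_eq_of (q : List (Int × Int)) (m : Int) (z : Int × Int)
    (hm : (q.map Prod.fst).max? = some m)
    (hz : q[q.findIdx (fun pi => pi.1 == m)]? = some z) :
    stepB q = z.2 :: stepB (q.drop (q.findIdx (fun pi => pi.1 == m) + 1) ++
      q.take (q.findIdx (fun pi => pi.1 == m))) := by
  rw [stepB, hm]
  dsimp only
  split
  · rename_i heq
    rw [hz] at heq
    exact absurd heq (by simp)
  · rename_i x1 heq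
    rw [hz] at heq
    obtain rfl : x1 = z := by simpa using heq.symm
    rw [stepB_arg]

theorem stepB_nil : stepB [] = [] := by
  rw [stepB]
  rfl

theorem stepB_rotate (x : Int × Int) (rest : List (Int × Int))
    (h : rest.any (fun a => decide (a.1 > x.1)) = true) :
    stepB (x :: rest) = stepB (rest ++ [x]) := by
  obtain ⟨a, ha, hgt⟩ := List.any_eq_true.mp h
  rw [decide_eq_true_eq] at hgt
  have hperm : ((rest ++ [x]).map Prod.fst).Perm ((x :: rest).map Prod.fst) := by
    simp only [List.map_append, List.map_cons, List.map_nil]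
    exact List.perm_append_singleton _ _
  obtain ⟨m, hm⟩ : ∃ m, ((x :: rest).map Prod.fst).max? = some m := by
    cases hmm : ((x :: rest).map Prod.fst).max? with
    | none => rw [List.max?_eq_none_iff] at hmm; simp at hmm
    | some m => exact ⟨m, rfl⟩
  obtain ⟨hmem, hub⟩ := List.max?_eq_some_iff.mp hm
  have hax : m > x.1 := lt_of_lt_of_le hgt
    (hub a.1 (by rw [List.map_cons]; exact List.mem_cons_of_mem _ (List.mem_map.mpr ⟨a, ha, rfl⟩)))
  have hxm : (x.1 == m) = false := by simp; omega
  have hmrest : m ∈ rest.map Prod.fst := by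
    rcases (by simpa using hmem : m = x.1 ∨ ∃ b, (m, b) ∈ rest) with h1 | ⟨b, hb⟩
    · omega
    · exact List.mem_map.mpr ⟨(m, b), hb, rfl⟩
  obtain ⟨y, hy, hym⟩ := List.mem_map.mp hmrest
  set j := rest.findIdx (fun pi => pi.1 == m) with hj
  have hjlt : j < rest.length := List.findIdx_lt_length.mpr ⟨y, hy, by simp [hym]⟩
  have hm' : ((rest ++ [x]).map Prod.fst).max? = some m := by rw [int_max?_perm hperm, hm]
  have hk1 : (x :: rest).findIdx (fun pi => pi.1 == m) = j + 1 := by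
    rw [List.findIdx_cons, hxm]; rfl
  have hk2 : (rest ++ [x]).findIdx (fun pi => pi.1 == m) = j := by
    rw [List.findIdx_append, if_pos hjlt]
  obtain ⟨z, hz⟩ : ∃ z, rest[j]? = some z := ⟨rest[j], List.getElem?_eq_getElem hjlt⟩
  have hsel1 : (x :: rest)[(x :: rest).findIdx (fun pi => pi.1 == m)]? = some z := by
    rw [hk1, List.getElem?_cons_succ, hz]
  have hsel2 : (rest ++ [x])[(rest ++ [x]).findIdx (fun pi => pi.1 == m)]? = some z := by
    rw [hk2, List.getElem?_append_left hjlt, hz]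
  rw [stepB_eq_of _ m z hm hsel1, stepB_eq_of _ m z hm' hsel2, hk1, hk2]
  have harg : (x :: rest).drop (j + 1 + 1) ++ (x :: rest).take (j + 1)
      = (rest ++ [x]).drop (j + 1) ++ (rest ++ [x]).take j := by
    rw [List.drop_append_of_le_length (by omega), List.take_append_of_le_length (by omega)]
    simp [List.append_assoc]
  rw [harg]

theorem stepB_front (x : Int × Int) (rest : List (Int × Int))
    (h : rest.any (fun a => decide (a.1 > x.1)) = false) :
    stepB (x :: rest) = x.2 :: stepB rest := by
  have hub : ∀ b ∈ (x :: rest).map Prod.fst, b ≤ x.1 := by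
    intro b hb
    rcases (by simpa using hb : b = x.1 ∨ ∃ c, (b, c) ∈ rest) with h1 | ⟨c, hc⟩
    · omega
    · have := List.any_eq_false.mp h (b, c) hc
      simp at this
      omega
  have hm : ((x :: rest).map Prod.fst).max? = some x.1 :=
    List.max?_eq_some_iff.mpr ⟨by simp, hub⟩
  have hk : (x :: rest).findIdx (fun pi => pi.1 == x.1) = 0 := by
    rw [List.findIdx_cons]; simp
  have hsel : (x :: rest)[(x :: rest).findIdx (fun pi => pi.1 == x.1)]? = some x := by
    rw [hk, List.getElem?_cons_zero]
  rw [stepB_eq_of _ x.1 x hm hsel, hk]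
  simp

theorem stepA_eq_stepB (q : List (Int × Int)) (res : List Int) :
    stepA q res = res ++ stepB q := by
  induction q, res using stepA.induct with
  | case1 res => rw [stepA, stepB_nil]; simp
  | case2 res x rest h ih =>
    rw [stepA, if_pos h, ih, stepB_rotate x rest h]
  | case3 res x rest h ih =>
    rw [stepA, if_neg (by simpa using h), ih, stepB_front x rest (by simpa using h)]
    simp

theorem stepB_perm : ∀ (q : List (Int × Int)), (stepB q).Perm (q.map Prod.snd) := by
  have main : ∀ (n : Nat) (q : List (Int × Int)), q.length = n →
      (stepB q).Perm (q.map Prod.snd) := by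
    intro n
    induction n using Nat.strong_induction_on with
    | _ n ih =>
      intro q hlen
      cases hm : (q.map Prod.fst).max? with
      | none =>
        rw [List.max?_eq_none_iff] at hm
        have hq : q = [] := by
          cases q with
          | nil => rfl
          | cons a t => simp at hm
        subst hq
        rw [stepB_nil]
        simp
      | some m =>
        obtain ⟨hmem, _⟩ := List.max?_eq_some_iff.mp hm
        obtain ⟨y, hy, hym⟩ := List.mem_map.mp hmem
        set k := q.findIdx (fun pi => pi.1 == m) with hkdef
        have hk : k < q.length := List.findIdx_lt_length.mpr ⟨y, hy, by simp [hym]⟩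
        have hsel : q[k]? = some q[k] := List.getElem?_eq_getElem hk
        rw [stepB_eq_of q m q[k] hm hsel]
        have hlt : (q.drop (k + 1) ++ q.take k).length < n := by
          rw [List.length_append, List.length_drop, List.length_take]
          omega
        have ihp := ih _ (by omega : (q.drop (k + 1) ++ q.take k).length < n)
          (q.drop (k + 1) ++ q.take k) rfl
        have hk2 : k < (q.map Prod.snd).length := by simpa using hk
        have hdecomp : q.map Prod.snd
            = (q.map Prod.snd).take k ++ q[k].2 :: (q.map Prod.snd).drop (k + 1) := by
          conv_lhs => rw [← List.take_append_drop k (q.map Prod.snd),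
            List.drop_eq_getElem_cons hk2]
          simp [hk]
        refine (List.Perm.cons q[k].2 ihp).trans ?_
        rw [hdecomp, List.map_append, List.map_take, List.map_drop]
        exact (List.Perm.cons _ List.perm_append_comm).trans List.perm_middle.symm
  exact fun q => main q.length q rfl

theorem scan_not_mem (res : List Int) (loc : Int) (s c : Int) (h : loc ∉ res) :
    (PySem.List.enumerate res s).foldl
      (fun ans iv => if iv.2 = loc then iv.1 + 1 else ans) c = c := by
  induction res generalizing s c with
  | nil => simp [PySem.List.enumerate_nil]
  | cons x t ih =>
    rw [PySem.List.enumerate_cons]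
    simp only [List.foldl_cons]
    rw [if_neg (by simp at h; exact fun hx => h.1 hx.symm)]
    exact ih (s + 1) c (by simp at h ⊢; exact h.2)

theorem scan_mem (res : List Int) (loc : Int) : ∀ (s : Int) (k : Nat),
    res.Nodup → PySem.List.index? res loc = some k → ∀ (c : Int),
    (PySem.List.enumerate res s).foldl
      (fun ans iv => if iv.2 = loc then iv.1 + 1 else ans) c = s + k + 1 := by
  induction res with
  | nil => intro s k _ h; simp [PySem.List.index?] at h
  | cons x t ih =>
    intro s k hn h c
    rw [PySem.List.enumerate_cons]
    simp only [List.foldl_cons]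
    by_cases hx : x = loc
    · subst hx
      rw [PySem.List.index?_cons_self] at h
      obtain rfl : k = 0 := by simpa using h.symm
      rw [if_pos rfl]
      have hnot : x ∉ t := (List.nodup_cons.mp hn).1
      rw [scan_not_mem t x (s + 1) (s + 1) hnot]
      ring
    · rw [PySem.List.index?_cons_of_ne t hx] at h
      obtain ⟨k', hk', rfl⟩ : ∃ k', PySem.List.index? t loc = some k' ∧ k = k' + 1 := by
        cases hi : PySem.List.index? t loc with
        | none => rw [hi] at h; simp at h
        | some k' => rw [hi] at h; simp at h; exact ⟨k', rfl, h.symm⟩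
      rw [if_neg hx]
      rw [ih (s + 1) k' (List.nodup_cons.mp hn).2 hk' c]
      push_cast
      ring

-- ===== VERDICT (by name: the statement is the Claim_ definition above) =====
theorem solution_spec : Claim_equal_solution := by
  intro priorities location _
  simp only [Spec_solution, solution, solution_alt]
  -- the two initial queues coincide
  have hbuild : (PySem.List.pyRange 0 (PySem.List.len priorities)).foldl
      (fun a i => a ++ [(PySem.List.pyGetD priorities i 0, i)]) []
      = (PySem.List.enumerate priorities).map (fun ip => (ip.2, ip.1)) := by
    rw [PySem.List.foldl_append_singleton_eq_map, PySem.List.enumerate_eq_map_pyRange priorities 0,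
      List.map_map]
    simp [PySem.List.len, Function.comp]
  rw [hbuild]
  set q := (PySem.List.enumerate priorities).map (fun ip => (ip.2, ip.1)) with hq
  set res := stepB q with hres
  rw [stepA_eq_stepB, List.nil_append, ← hres]
  -- the executed order has no duplicate indices
  have hnodup : res.Nodup := by
    refine (stepB_perm q).symm.nodup ?_
    rw [hq, List.map_map]
    have : (Prod.snd ∘ fun ip : Int × Int => (ip.2, ip.1)) = Prod.fst := rfl
    rw [this, PySem.List.map_fst_enumerate]
    exact PySem.List.nodup_pyRange_one _ _
  -- A's final scan, re-read as a fold over enumerate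
  have hscan : (PySem.List.pyRange 0 (PySem.List.len res)).foldl
      (fun ans i => if PySem.List.pyGetD res i 0 = location then i + 1 else ans) 0
      = (PySem.List.enumerate res 0).foldl
          (fun ans iv => if iv.2 = location then iv.1 + 1 else ans) 0 := by
    rw [PySem.List.enumerate_eq_map_pyRange res 0, List.foldl_map]
  rw [hscan]
  cases hidx : PySem.List.index? res location with
  | none =>
    rw [scan_not_mem res location 0 0 ((PySem.List.index?_eq_none_iff res location).mp hidx)]
  | some k =>
    rw [scan_mem res location 0 k hnodup hidx 0]
    ring
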